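-- pv_equiv track=rewrite | github.com/springboardmentor330h/Project-Repo-Batch-11- | app.py | summary_has_repetition
-- ===== SOURCE A (Python) =====
-- from collections import Counter
--
-- def summary_has_repetition(summary: str) -> bool:
--     """Check if the summary has repeating trigrams (looping error)."""
--     if not summary:
--         return False
--     words = summary.lower().split()
--     trigrams = [" ".join(words[i : i + 3]) for i in range(len(words) - 2)]
--     if not trigrams:
--         return False
--     counts = Counter(trigrams)
--     return any(v > 2 for v in counts.values())
-- ===== SOURCE B (Python) =====
-- def summary_has_repetition(summary: str) -> bool:
--     """Check if the summary has repeating trigrams (looping error)."""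
--     words = summary.lower().split()
--     trigrams = [" ".join(words[i : i + 3]) for i in range(len(words) - 2)]
--     prev = None
--     run = 0
--     for t in sorted(trigrams):
--         if t == prev:
--             run += 1
--             if run > 2:
--                 return True
--         else:
--             prev = t
--             run = 1
--     return False
-- ===== Notes on version B (the rewrite author's own statement) =====
-- stated objective: alternative
-- what changed: Replaces the Counter hash-count plus any() threshold scan by sorting the trigram list and scanning it once with a run-length counter, returning True as soon as a run exceeds 2; the empty/short guards disappear because the empty run-scan returns False.
import Mathlib
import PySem

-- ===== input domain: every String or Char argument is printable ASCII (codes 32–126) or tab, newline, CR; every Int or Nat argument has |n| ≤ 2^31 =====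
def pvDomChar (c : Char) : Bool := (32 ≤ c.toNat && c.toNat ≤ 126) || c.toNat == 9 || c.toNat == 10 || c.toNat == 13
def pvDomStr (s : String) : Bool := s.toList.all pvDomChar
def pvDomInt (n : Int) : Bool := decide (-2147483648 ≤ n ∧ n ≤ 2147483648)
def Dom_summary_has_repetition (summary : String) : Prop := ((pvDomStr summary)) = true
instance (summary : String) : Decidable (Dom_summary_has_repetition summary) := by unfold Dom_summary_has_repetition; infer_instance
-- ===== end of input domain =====

-- B replaces A's Counter + any() threshold by sorting the trigram list and scanning it once with a
-- run-length counter (alternative algorithm, same observable behaviour; no mutation involved).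

-- ===== PORT A =====
def summary_has_repetition (summary : String) : Bool :=
  if summary = "" then false
  else
    let words := PySem.Str.split₀ (PySem.Str.lower summary)
    let trigrams := (PySem.List.pyRange 0 ((words.length : Int) - 2) 1).map
        (fun i => PySem.Str.join " " (PySem.List.slice words (some i) (some (i + 3))))
    if trigrams = [] then false
    else (PySem.Dict.counter trigrams).values.any (fun v => decide (2 < v))

-- ===== PORT B =====
-- the for-loop of Source B with its early return: state = (prev, run), one step per sorted trigram
def pvScanRun : Option String → Int → List String → Bool
  | _, _, [] => false
  | prev, run, t :: rest =>
    if some t = prev then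
      if 2 < run + 1 then true else pvScanRun (some t) (run + 1) rest
    else pvScanRun (some t) 1 rest

def summary_has_repetition_alt (summary : String) : Bool :=
  let words := PySem.Str.split₀ (PySem.Str.lower summary)
  let trigrams := (PySem.List.pyRange 0 ((words.length : Int) - 2) 1).map
      (fun i => PySem.Str.join " " (PySem.List.slice words (some i) (some (i + 3))))
  pvScanRun none 0 (PySem.List.sorted trigrams (fun x => x) false)

-- ===== PRECONDITION & SPEC =====
def Spec_summary_has_repetition (summary : String) (out : Bool) : Prop := out = summary_has_repetition_alt summary
instance (summary : String) (out : Bool) : Decidable (Spec_summary_has_repetition summary out) := by unfold Spec_summary_has_repetition; infer_instance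

-- ===== CLAIM (what is proved, stated in full; the proofs are below) =====
def Claim_equal_summary_has_repetition : Prop := ∀ (summary : String), Dom_summary_has_repetition summary → Spec_summary_has_repetition summary (summary_has_repetition summary)

-- ===== LEMMAS AND PROOFS =====

-- count of t is unchanged by consing a different head
lemma pv_count_cons_ne {h t : String} (rest : List String) (he : ¬ t = h) :
    (h :: rest).count t = rest.count t := by
  rw [List.count_cons]
  simp only [beq_iff_eq]
  rw [if_neg (fun hh => he hh.symm)]
  omega

-- collapsing a fresh head: "run of 1 + rest, or a heavy element of rest" is "a heavy element of h :: rest"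
lemma pv_cons_count_iff (h : String) (rest : List String) :
    (2 < 1 + (rest.count h : Int) ∨ ∃ t ∈ rest, 2 < (rest.count t : Int)) ↔
      ∃ t ∈ h :: rest, 2 < ((h :: rest).count t : Int) := by
  constructor
  · rintro (h1 | ⟨t, ht, hc⟩)
    · refine ⟨h, List.mem_cons_self, ?_⟩
      rw [List.count_cons_self]; push_cast at h1 ⊢; omega
    · by_cases he : t = h
      · subst he
        refine ⟨t, List.mem_cons_self, ?_⟩
        rw [List.count_cons_self]; push_cast at hc ⊢; omega
      · refine ⟨t, List.mem_cons_of_mem _ ht, ?_⟩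
        rwa [pv_count_cons_ne rest he]
  · rintro ⟨t, ht, hc⟩
    by_cases he : t = h
    · subst he
      rw [List.count_cons_self] at hc
      left; push_cast at hc ⊢; omega
    · rcases List.mem_cons.mp ht with h' | h'
      · exact absurd h' he
      · right
        refine ⟨t, h', ?_⟩
        rwa [pv_count_cons_ne rest he] at hc

-- the run-scan on a sorted tail, with an active run of length r (1 ≤ r ≤ 2) of the value p
lemma pv_scan_spec (l : List String) (p : String) (r : Int)
    (hs : l.Pairwise (· ≤ ·)) (hle : ∀ x ∈ l, p ≤ x) (h1 : 1 ≤ r) (h2 : r ≤ 2) :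
    (pvScanRun (some p) r l = true ↔
      (2 < r + (l.count p : Int) ∨ ∃ t ∈ l, 2 < (l.count t : Int))) := by
  induction l generalizing p r with
  | nil => simp [pvScanRun]; omega
  | cons h rest ih =>
    have hpw := (List.pairwise_cons.mp hs).2
    have hhd := (List.pairwise_cons.mp hs).1
    by_cases he : h = p
    · subst he
      rw [pvScanRun, if_pos rfl]
      by_cases hr : (2 : Int) < r + 1
      · rw [if_pos hr]
        simp only [true_iff]
        left
        have : 1 ≤ (h :: rest).count h := List.one_le_count_iff.mpr List.mem_cons_self
        omega
      · rw [if_neg hr]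
        rw [ih h (r + 1) hpw hhd (by omega) (by omega)]
        constructor
        · rintro (h' | ⟨t, ht, hc⟩)
          · left; rw [List.count_cons_self]; push_cast at h' ⊢; omega
          · by_cases he2 : t = h
            · subst he2; left
              rw [List.count_cons_self]
              push_cast at hc ⊢; omega
            · right
              refine ⟨t, List.mem_cons_of_mem _ ht, ?_⟩
              rwa [pv_count_cons_ne rest he2]
        · rintro (h' | ⟨t, ht, hc⟩)
          · left; rw [List.count_cons_self] at h'; push_cast at h' ⊢; omega
          · by_cases he2 : t = h
            · subst he2
              rw [List.count_cons_self] at hc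
              left; push_cast at hc ⊢; omega
            · rcases List.mem_cons.mp ht with h'' | h''
              · exact absurd h'' he2
              · right
                refine ⟨t, h'', ?_⟩
                rwa [pv_count_cons_ne rest he2] at hc
    · have hne : some h ≠ some p := by simp [he]
      rw [pvScanRun, if_neg hne]
      have hnotmem : p ∉ h :: rest := by
        intro hm
        rcases List.mem_cons.mp hm with h' | h'
        · exact he h'.symm
        · exact he (le_antisymm (hhd p h') (hle h List.mem_cons_self))
      have hcnt0 : (h :: rest).count p = 0 := List.count_eq_zero.mpr hnotmem
      rw [ih h 1 hpw hhd le_rfl (by omega)]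
      rw [pv_cons_count_iff, hcnt0]
      constructor
      · exact fun h' => Or.inr h'
      · rintro (h' | h')
        · push_cast at h'; omega
        · exact h'

-- starting the scan: prev = None matches nothing, so the first element opens a run of 1
lemma pv_scan_start (l : List String) (hs : l.Pairwise (· ≤ ·)) :
    (pvScanRun none 0 l = true ↔ ∃ t ∈ l, 2 < (l.count t : Int)) := by
  cases l with
  | nil => simp [pvScanRun]
  | cons h rest =>
    rw [pvScanRun, if_neg (by simp)]
    rw [pv_scan_spec rest h 1 (List.pairwise_cons.mp hs).2 (List.pairwise_cons.mp hs).1 le_rfl (by omega)]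
    exact pv_cons_count_iff h rest

-- the common tail of the two ports, over an arbitrary trigram list
lemma pv_tail_eq (ts : List String) :
    (if ts = [] then false
     else (PySem.Dict.counter ts).values.any (fun v => decide (2 < v))) =
      pvScanRun none 0 (PySem.List.sorted ts (fun x => x) false) := by
  by_cases hnil : ts = []
  · subst hnil
    rfl
  · rw [if_neg hnil, Bool.eq_iff_iff]
    have hA : ((PySem.Dict.counter ts).values.any (fun v => decide (2 < v)) = true ↔
        ∃ t ∈ ts, 2 < (ts.count t : Int)) := by
      have hv : (PySem.Dict.counter ts).values =
          (PySem.Set.ofList ts).map (fun k => (ts.count k : Int)) := by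
        show (PySem.Dict.counter ts).items.map (·.2) = _
        rw [PySem.Dict.items_counter]
        simp
      rw [hv]
      simp only [List.any_map, List.any_eq_true]
      constructor
      · rintro ⟨t, ht, hc⟩
        exact ⟨t, (PySem.Set.mem_ofList ts t).mp ht, by simpa using hc⟩
      · rintro ⟨t, ht, hc⟩
        exact ⟨t, (PySem.Set.mem_ofList ts t).mpr ht, by simpa using hc⟩
    rw [hA]
    rw [pv_scan_start _ (PySem.List.sorted_pairwise ts (fun x => x))]
    have hperm : (PySem.List.sorted ts (fun x => x) false).Perm ts :=
      PySem.List.sorted_perm ts (fun x => x) false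
    constructor
    · rintro ⟨t, ht, hc⟩
      exact ⟨t, (PySem.List.mem_sorted _ _ _ _).mpr ht, by rw [hperm.count_eq]; exact hc⟩
    · rintro ⟨t, ht, hc⟩
      exact ⟨t, (PySem.List.mem_sorted _ _ _ _).mp ht, by rw [← hperm.count_eq]; exact hc⟩

-- ===== VERDICT (by name: the statement is the Claim_ definition above) =====
theorem summary_has_repetition_spec : Claim_equal_summary_has_repetition := by
  intro summary _
  unfold Spec_summary_has_repetition
  by_cases hemp : summary = ""
  · subst hemp
    decide
  · rw [summary_has_repetition, summary_has_repetition_alt]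
    rw [if_neg hemp]
    exact pv_tail_eq _
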